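-- pv_equiv track=rewrite | github.com/yuyichao/srtctrl | lib/srt_comm/jsonstm.py | _j_to_str_end
-- ===== SOURCE A (Python) =====
-- _J_RES_OPEN = -1
--
-- _J_RES_BLK = -2
--
-- def _j_none_blk(jstr, start=0, char=None):
--     i = start
--     l = len(jstr)
--     while i < l:
--         if not jstr[i] in _j_blk_chars:
--             if not char is None and not jstr[i] in char:
--                 return
--             return i
--         i += 1
--     return _J_RES_BLK
--
-- def _j_to_str_end(jstr, start=0):
--     l = len(jstr)
--     i = _j_none_blk(jstr, start=start, char='"')
--     if i is None:
--         return
--     if i == _J_RES_BLK: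
--         return _J_RES_BLK
--     while i < l - 1:
--         i += 1
--         if jstr[i] == '"':
--             return i
--         elif jstr[i] == '\\':
--             i += 1
--             if i >= l:
--                 break
--             if jstr[i] == 'u':
--                 i += 4
--             continue
--         else:
--             pass
--     return _J_RES_OPEN
--
-- _j_blk_chars = ' \t\n\r'
-- ===== SOURCE B (Python) =====
-- _J_RES_OPEN = -1
--
-- _J_RES_BLK = -2
--
-- _j_blk_chars = ' \t\n\r'
--
-- def _j_none_blk(jstr, start=0, char=None):
--     i = start
--     l = len(jstr)
--     while i < l:
--         if not jstr[i] in _j_blk_chars: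
--             if not char is None and not jstr[i] in char:
--                 return
--             return i
--         i += 1
--     return _J_RES_BLK
--
-- def _j_to_str_end(jstr, start=0):
--     i = _j_none_blk(jstr, start=start, char='"')
--     if i is None:
--         return
--     if i == _J_RES_BLK:
--         return _J_RES_BLK
--     # jump from token to token with str.find instead of stepping char by char
--     rest = jstr[i + 1:]
--     k = 0
--     while True:
--         q = rest.find('"')
--         b = rest.find('\\')
--         if b == -1 or (q != -1 and q < b):
--             return i + 1 + k + q if q != -1 else _J_RES_OPEN
--         if b + 1 >= len(rest):
--             return _J_RES_OPEN
--         step = b + (6 if rest[b + 1] == 'u' else 2)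
--         rest = rest[step:]
--         k += step
-- ===== Notes on version B (the rewrite author's own statement) =====
-- stated objective: alternative
-- what changed: After locating the opening quote with the same _j_none_blk call, B replaces A's char-by-char index loop with a loop that jumps directly to the next quote/backslash via str.find on the remaining suffix, slicing past each escape (2 chars, 6 for \u).
-- outside the precondition, e.g. on _j_to_str_end('"ab', -3): A returns 0, B returns -1
import Mathlib
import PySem

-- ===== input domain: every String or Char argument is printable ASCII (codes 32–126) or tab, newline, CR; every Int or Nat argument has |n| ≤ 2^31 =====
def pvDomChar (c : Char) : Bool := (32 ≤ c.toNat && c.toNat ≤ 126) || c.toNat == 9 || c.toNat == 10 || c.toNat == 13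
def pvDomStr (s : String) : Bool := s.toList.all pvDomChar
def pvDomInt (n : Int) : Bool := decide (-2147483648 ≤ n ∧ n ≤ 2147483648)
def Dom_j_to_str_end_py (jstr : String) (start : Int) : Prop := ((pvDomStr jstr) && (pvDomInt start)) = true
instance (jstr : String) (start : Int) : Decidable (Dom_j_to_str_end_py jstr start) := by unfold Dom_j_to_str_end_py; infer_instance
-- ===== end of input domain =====

-- B replaces A's char-by-char index walk after the opening quote by str.find-based jumps to the
-- next quote/backslash (objective: alternative; same O(n)).

-- ===== PORT A =====
-- _j_none_blk specialised to char='"' exactly as A calls it (Source B makes the identical call);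
-- none = Python None, some i = returned index or the -2 (_J_RES_BLK) sentinel
def j_none_blk_quote (cs : List Char) (l i : Int) : Option Int :=
  if _h : i < l then
    match PySem.List.pyGet? cs i with
    | none => none        -- Python raises IndexError here (only when i < -len); excluded by Pre_
    | some c =>
      if c = ' ' ∨ c = '\t' ∨ c = '\n' ∨ c = '\r' then
        j_none_blk_quote cs l (i + 1)
      else if c = '"' then some i else none
  else some (-2)
termination_by (l - i).toNat
decreasing_by omega

-- the while-loop of _j_to_str_end; state i = current index, returns the closing index or -1
def j_str_loopA (cs : List Char) (l i : Int) : Int :=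
  if _h : i < l - 1 then
    match PySem.List.pyGet? cs (i + 1) with
    | none => -1          -- Python raises; unreachable for 0 ≤ i under Pre_
    | some c =>
      if c = '"' then i + 1
      else if c = '\\' then
        if l ≤ i + 2 then -1     -- 'if i >= l: break'
        else
          match PySem.List.pyGet? cs (i + 2) with
          | none => -1
          | some c2 => if c2 = 'u' then j_str_loopA cs l (i + 6) else j_str_loopA cs l (i + 2)
      else j_str_loopA cs l (i + 1)
  else -1
termination_by (l - i).toNat
decreasing_by all_goals omega

def j_to_str_end_py (jstr : String) (start : Int) : Option Int :=
  let cs := jstr.toList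
  let l : Int := cs.length
  match j_none_blk_quote cs l start with
  | none => none
  | some i => if i = -2 then some (-2) else some (j_str_loopA cs l i)

-- ===== PORT B =====
-- Source B's find-jump loop: rest = remaining suffix, k = offset of rest inside jstr[i+1:]
def j_str_loopB (rest : List Char) (i k : Int) : Int :=
  let q := PySem.Chars.find rest ['"']
  let b := PySem.Chars.find rest ['\\']
  if _h1 : b = -1 ∨ (q ≠ -1 ∧ q < b) then
    if q ≠ -1 then i + 1 + k + q else -1
  else if _h2 : (PySem.List.len rest) ≤ b + 1 then -1
  else
    let step := b + (if PySem.List.pyGet? rest (b + 1) = some 'u' then 6 else 2)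
    j_str_loopB (PySem.List.slice rest (some step) none) i (k + step)
termination_by rest.length
decreasing_by
  have hb1 : -1 ≤ PySem.Chars.find rest ['\\'] := PySem.Chars.neg_one_le_find rest ['\\']
  simp only [PySem.List.len_eq] at _h2
  have hb0 : 0 ≤ PySem.Chars.find rest ['\\'] := by
    rcases (not_or.mp _h1) with ⟨hne, -⟩; omega
  split
  all_goals rw [PySem.List.slice_from rest (by omega), List.length_drop]; omega

def j_to_str_end_py_alt (jstr : String) (start : Int) : Option Int :=
  let cs := jstr.toList
  let l : Int := cs.length
  match j_none_blk_quote cs l start with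
  | none => none
  | some i =>
    if i = -2 then some (-2)
    else some (j_str_loopB (PySem.List.slice cs (some (i + 1)) none) i 0)

-- ===== PRECONDITION & SPEC =====
-- Pre_ restricts to nonnegative start, the scanner's natural domain: on a negative start Python's
-- negative indexing makes A wrap around and rescan from the string's beginning (or raise
-- IndexError when start < -len(jstr)).
def Pre_j_to_str_end_py (jstr : String) (start : Int) : Prop := 0 ≤ start
instance (jstr : String) (start : Int) : Decidable (Pre_j_to_str_end_py jstr start) := by unfold Pre_j_to_str_end_py; infer_instance

def pvWitness_j_to_str_end_py : String × Int := ("  \"ab\\\"c\"", 0)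

def Spec_j_to_str_end_py (jstr : String) (start : Int) (out : Option Int) : Prop := out = j_to_str_end_py_alt jstr start
instance (jstr : String) (start : Int) (out : Option Int) : Decidable (Spec_j_to_str_end_py jstr start out) := by unfold Spec_j_to_str_end_py; infer_instance

-- ===== CLAIM (what is proved, stated in full; the proofs are below) =====
def Claim_equal_j_to_str_end_py : Prop := ∀ (jstr : String) (start : Int), Dom_j_to_str_end_py jstr start → Pre_j_to_str_end_py jstr start → Spec_j_to_str_end_py jstr start (j_to_str_end_py jstr start)

-- ===== LEMMAS AND PROOFS =====

-- reference scanner both loops are reduced to: offset of the closing quote, none = unterminated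
def tok : List Char → Option Nat
  | [] => none
  | c :: rest =>
    if c = '"' then some 0
    else if c = '\\' then
      match rest with
      | [] => none
      | c2 :: rest' =>
        if c2 = 'u' then (tok (rest'.drop 4)).map (· + 6) else (tok rest').map (· + 2)
    else (tok rest).map (· + 1)
termination_by cs => cs.length
decreasing_by all_goals simp [List.length_drop] <;> omega

theorem tok_nil : tok [] = none := by rw [tok.eq_def]
theorem tok_quote (rest : List Char) : tok ('"' :: rest) = some 0 := by rw [tok.eq_def]; simp
theorem tok_ord (c : Char) (rest : List Char) (h1 : c ≠ '"') (h2 : c ≠ '\\') :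
    tok (c :: rest) = (tok rest).map (· + 1) := by rw [tok.eq_def]; simp [h1, h2]
theorem tok_bs_nil : tok ['\\'] = none := by rw [tok.eq_def]; simp
theorem tok_bs_u (rest' : List Char) : tok ('\\' :: 'u' :: rest') = (tok (rest'.drop 4)).map (· + 6) := by
  rw [tok.eq_def]; simp
theorem tok_bs_other (c2 : Char) (rest' : List Char) (h : c2 ≠ 'u') :
    tok ('\\' :: c2 :: rest') = (tok rest').map (· + 2) := by rw [tok.eq_def]; simp [h]

theorem sing_prefix (c : Char) (l : List Char) : [c] <+: l ↔ l.head? = some c := by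
  cases l with
  | nil => simp
  | cons a as => simp [List.cons_prefix_cons, eq_comm]

theorem find_char_neg (l : List Char) (c : Char) : PySem.Chars.find l [c] = -1 ↔ c ∉ l := by
  rw [PySem.Chars.find_eq_neg_one_iff, List.singleton_infix_iff]

theorem find_char_pos (l : List Char) (c : Char) (h : PySem.Chars.find l [c] ≠ -1) :
    0 ≤ PySem.Chars.find l [c] ∧
    l[(PySem.Chars.find l [c]).toNat]? = some c ∧
    ∀ j : Nat, j < (PySem.Chars.find l [c]).toNat → l[j]? ≠ some c := by
  have h0 : 0 ≤ PySem.Chars.find l [c] := by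
    have := PySem.Chars.neg_one_le_find l [c]; omega
  have hs := PySem.Chars.findFrom_natCast_spec l [c] 0 (Nat.zero_le _)
  rw [Nat.cast_zero, PySem.Chars.findFrom_zero] at hs
  obtain ⟨-, hpre, hmin⟩ := hs h
  refine ⟨h0, ?_, ?_⟩
  · rw [← List.head?_drop, ← sing_prefix]; exact hpre
  · intro j hj hget
    exact hmin j (Nat.zero_le _) hj (by rw [sing_prefix, List.head?_drop]; exact hget)

theorem tok_skip (m : Nat) : ∀ rest : List Char, m ≤ rest.length →
    (∀ j : Nat, j < m → rest[j]? ≠ some '"' ∧ rest[j]? ≠ some '\\') →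
    tok rest = (tok (rest.drop m)).map (· + m) := by
  induction m with
  | zero =>
    intro rest _ _
    simp only [List.drop_zero]
    cases tok rest <;> simp
  | succ m ih =>
    intro rest hlen hord
    cases rest with
    | nil => simp at hlen
    | cons a as =>
      have h0 := hord 0 (by omega)
      simp only [List.getElem?_cons_zero, ne_eq, Option.some.injEq] at h0
      rw [tok_ord a as h0.1 h0.2,
          ih as (by simpa using hlen) (fun j hj => by
            have := hord (j+1) (by omega)
            simpa using this)]
      simp only [List.drop_succ_cons]
      cases tok (as.drop m) <;> simp <;> omega

theorem loopA_eq_tok (cs : List Char) (n : Nat) : ∀ i : Int, 0 ≤ i → cs.length ≤ i.toNat + n →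
    j_str_loopA cs cs.length i =
      (match tok (cs.drop (i + 1).toNat) with
      | some t => i + 1 + t
      | none => -1) := by
  induction n with
  | zero =>
    intro i hi hn
    rw [j_str_loopA, dif_neg (by omega), List.drop_eq_nil_of_le (by omega), tok_nil]
  | succ n ih =>
    intro i hi hn
    rw [j_str_loopA]
    by_cases h : i < (cs.length : Int) - 1
    · rw [dif_pos h]
      have h1 : (i+1).toNat < cs.length := by omega
      rw [PySem.List.pyGet?_eq_some_getElem cs (by omega) (by omega),
          List.drop_eq_getElem_cons h1]
      dsimp only
      set c := cs[(i+1).toNat] with hc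
      by_cases hq : c = '"'
      · rw [if_pos hq, hq, tok_quote]; dsimp only; push_cast; ring
      · rw [if_neg hq]
        by_cases hb : c = '\\'
        · rw [if_pos hb, hb]
          by_cases h2 : (cs.length : Int) ≤ i + 2
          · rw [if_pos h2, List.drop_eq_nil_of_le (by omega), tok_bs_nil]
          · rw [if_neg h2]
            have h2' : (i+2).toNat < cs.length := by omega
            rw [PySem.List.pyGet?_eq_some_getElem cs (by omega) (by omega)]
            have e1 : (i+1).toNat + 1 = (i+2).toNat := by omega
            rw [e1, List.drop_eq_getElem_cons h2']
            dsimp only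
            set c2 := cs[(i+2).toNat] with hc2
            by_cases hu : c2 = 'u'
            · rw [if_pos hu, hu, tok_bs_u, ih (i+6) (by omega) (by omega), List.drop_drop]
              have e2 : (i+2).toNat + 1 + 4 = (i+6+1).toNat := by omega
              rw [e2]
              cases tok (cs.drop (i+6+1).toNat) <;>
                simp only [Option.map_none, Option.map_some] <;> (try dsimp only) <;>
                push_cast <;> try ring
            · rw [if_neg hu, tok_bs_other c2 _ hu, ih (i+2) (by omega) (by omega)]
              have e2 : (i+2).toNat + 1 = (i+2+1).toNat := by omega
              rw [e2]
              cases tok (cs.drop (i+2+1).toNat) <;>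
                simp only [Option.map_none, Option.map_some] <;> (try dsimp only) <;>
                push_cast <;> try ring
        · rw [if_neg hb, tok_ord c _ hq hb, ih (i+1) (by omega) (by omega)]
          have e2 : (i+1).toNat + 1 = (i+1+1).toNat := by omega
          rw [e2]
          cases tok (cs.drop (i+1+1).toNat) <;>
            simp only [Option.map_none, Option.map_some] <;> (try dsimp only) <;>
            push_cast <;> try ring
    · rw [dif_neg h, List.drop_eq_nil_of_le (by omega), tok_nil]

theorem loopB_eq_tok (n : Nat) : ∀ (rest : List Char), rest.length ≤ n → ∀ i k : Int,
    j_str_loopB rest i k =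
      (match tok rest with
      | some t => i + 1 + k + t
      | none => -1) := by
  induction n with
  | zero =>
    intro rest hlen i k
    have hnil : rest = [] := List.eq_nil_of_length_eq_zero (by omega)
    subst hnil
    rw [j_str_loopB]
    have hq : PySem.Chars.find ([] : List Char) ['"'] = -1 := (find_char_neg _ _).mpr (by simp)
    have hb : PySem.Chars.find ([] : List Char) ['\\'] = -1 := (find_char_neg _ _).mpr (by simp)
    rw [dif_pos (Or.inl hb), if_neg (by simp [hq]), tok_nil]
  | succ n ih =>
    intro rest hlen i k
    rw [j_str_loopB]
    set q := PySem.Chars.find rest ['"'] with hqdef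
    set b := PySem.Chars.find rest ['\\'] with hbdef
    by_cases h1 : b = -1 ∨ (q ≠ -1 ∧ q < b)
    · rw [dif_pos h1]
      by_cases hq : q = -1
      · rw [if_neg (by simp [hq])]
        have hb : b = -1 := by rcases h1 with h | ⟨hne, -⟩; exact h; exact absurd hq hne
        have hnone : tok rest = none := by
          rw [tok_skip rest.length rest le_rfl (fun j hj => by
            constructor
            · intro hg
              exact ((find_char_neg rest '"').mp hq) (List.mem_of_getElem? hg)
            · intro hg
              exact ((find_char_neg rest '\\').mp hb) (List.mem_of_getElem? hg))]
          simp [tok_nil]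
        rw [hnone]
      · rw [if_pos hq]
        obtain ⟨hq0, hqget, hqmin⟩ := find_char_pos rest '"' hq
        have hordb : ∀ j : Nat, j < q.toNat → rest[j]? ≠ some '\\' := by
          intro j hj hg
          rcases h1 with hb | ⟨-, hlt⟩
          · exact ((find_char_neg rest '\\').mp hb) (List.mem_of_getElem? hg)
          · obtain ⟨hb0, -, hbmin⟩ := find_char_pos rest '\\' (by omega)
            exact hbmin j (by omega) hg
        have hqlen : q.toNat < rest.length := by
          by_contra hge
          rw [List.getElem?_eq_none (by omega)] at hqget
          simp at hqget
        rw [tok_skip q.toNat rest (by omega) (fun j hj => ⟨hqmin j hj, hordb j hj⟩)]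
        rw [List.drop_eq_getElem_cons hqlen]
        have : rest[q.toNat] = '"' := by
          have := List.getElem?_eq_getElem hqlen
          rw [this] at hqget; exact Option.some.inj hqget
        rw [this, tok_quote]
        simp; omega
    · rw [dif_neg h1]
      have hb : b ≠ -1 := fun h => h1 (Or.inl h)
      obtain ⟨hb0, hbget, hbmin⟩ := find_char_pos rest '\\' hb
      have hb0' : (0 : Int) ≤ b := hb0
      have hblen : b.toNat < rest.length := by
        by_contra hge
        rw [List.getElem?_eq_none (by omega)] at hbget
        simp at hbget
      have hbc : rest[b.toNat] = '\\' := by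
        have := List.getElem?_eq_getElem hblen
        rw [this] at hbget; exact Option.some.inj hbget
      have hord : ∀ j : Nat, j < b.toNat → rest[j]? ≠ some '"' ∧ rest[j]? ≠ some '\\' := by
        intro j hj
        refine ⟨?_, hbmin j hj⟩
        intro hg
        rcases not_or.mp h1 with ⟨-, h2⟩
        rcases not_and_or.mp h2 with hq | hnlt
        · push_neg at hq
          exact ((find_char_neg rest '"').mp hq) (List.mem_of_getElem? hg)
        · push_neg at hnlt
          rw [← hbdef] at hb0
          have hqne : PySem.Chars.find rest ['"'] ≠ -1 := by
            rw [← hqdef]; intro h; rw [h] at hnlt; omega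
          obtain ⟨hq0, -, hqmin⟩ := find_char_pos rest '"' hqne
          rw [← hqdef] at hq0
          exact hqmin j (by omega) hg
      have htok : tok rest = (tok (rest.drop b.toNat)).map (· + b.toNat) :=
        tok_skip b.toNat rest (by omega) hord
      by_cases h2 : (PySem.List.len rest) ≤ b + 1
      · rw [dif_pos h2]
        simp only [PySem.List.len_eq] at h2
        rw [htok, List.drop_eq_getElem_cons hblen, hbc,
            List.drop_eq_nil_of_le (by omega), tok_bs_nil]
        simp
      · rw [dif_neg h2]
        simp only [PySem.List.len_eq] at h2
        have hb1len : b.toNat + 1 < rest.length := by omega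
        rw [PySem.List.pyGet?_eq_some_getElem rest (by omega) (by omega)]
        have e1 : (b + 1).toNat = b.toNat + 1 := by omega
        simp only [e1]
        have hdropb : rest.drop b.toNat = '\\' :: rest[b.toNat + 1] :: rest.drop (b.toNat + 1 + 1) := by
          rw [List.drop_eq_getElem_cons hblen, hbc, List.drop_eq_getElem_cons hb1len]
        by_cases hu : rest[b.toNat + 1] = 'u'
        · rw [if_pos (by rw [hu])]
          rw [PySem.List.slice_from rest (by omega)]
          rw [ih (rest.drop (b + 6).toNat) (by rw [List.length_drop]; omega) i (k + (b + 6))]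
          rw [htok, hdropb, hu, tok_bs_u, List.drop_drop]
          have e2 : b.toNat + 1 + 1 + 4 = (b + 6).toNat := by omega
          rw [e2]
          cases tok (rest.drop (b + 6).toNat) <;> simp [Int.toNat_of_nonneg hb0'] <;> ring
        · rw [if_neg (by simpa using hu)]
          rw [PySem.List.slice_from rest (by omega)]
          rw [ih (rest.drop (b + 2).toNat) (by rw [List.length_drop]; omega) i (k + (b + 2))]
          rw [htok, hdropb, tok_bs_other _ _ hu]
          have e2 : b.toNat + 1 + 1 = (b + 2).toNat := by omega
          rw [e2]
          cases tok (rest.drop (b + 2).toNat) <;> simp [Int.toNat_of_nonneg hb0'] <;> ring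

theorem none_blk_ge (cs : List Char) (l : Int) (n : Nat) : ∀ start : Int, 0 ≤ start →
    (l - start).toNat ≤ n → ∀ i : Int, j_none_blk_quote cs l start = some i → i = -2 ∨ 0 ≤ i := by
  induction n with
  | zero =>
    intro start hs hn i hres
    rw [j_none_blk_quote, dif_neg (by omega)] at hres
    left
    have := Option.some.inj hres
    omega
  | succ n ih =>
    intro start hs hn i hres
    rw [j_none_blk_quote] at hres
    by_cases h : start < l
    · rw [dif_pos h] at hres
      cases hg : PySem.List.pyGet? cs start with
      | none => rw [hg] at hres; exact absurd hres (by simp)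
      | some c =>
        rw [hg] at hres
        dsimp only at hres
        by_cases hblk : c = ' ' ∨ c = '\t' ∨ c = '\n' ∨ c = '\r'
        · rw [if_pos hblk] at hres
          exact ih (start + 1) (by omega) (by omega) i hres
        · rw [if_neg hblk] at hres
          by_cases hqc : c = '"'
          · rw [if_pos hqc] at hres
            right
            have := Option.some.inj hres
            omega
          · rw [if_neg hqc] at hres
            exact absurd hres (by simp)
    · rw [dif_neg h] at hres
      left
      have := Option.some.inj hres
      omega

-- ===== VERDICT (by name: the statement is the Claim_ definition above) =====
theorem j_to_str_end_py_spec : Claim_equal_j_to_str_end_py := by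
  unfold Claim_equal_j_to_str_end_py
  intro jstr start _hdom hpre
  unfold Spec_j_to_str_end_py j_to_str_end_py j_to_str_end_py_alt
  unfold Pre_j_to_str_end_py at hpre
  dsimp only
  cases hres : j_none_blk_quote jstr.toList (jstr.toList.length : Int) start with
  | none => rfl
  | some i =>
    dsimp only
    by_cases hi2 : i = -2
    · rw [if_pos hi2, if_pos hi2]
    · rw [if_neg hi2, if_neg hi2]
      have hi0 : 0 ≤ i := by
        rcases none_blk_ge jstr.toList (jstr.toList.length) (jstr.toList.length - start).toNat
          start hpre le_rfl i hres with h | h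
        · exact absurd h hi2
        · exact h
      rw [PySem.List.slice_from jstr.toList (by omega)]
      rw [loopA_eq_tok jstr.toList jstr.toList.length i hi0 (by omega)]
      rw [loopB_eq_tok (jstr.toList.drop (i + 1).toNat).length (jstr.toList.drop (i + 1).toNat)
        le_rfl i 0]
      cases tok (jstr.toList.drop (i + 1).toNat) <;> simp
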